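-- pv_equiv track=rewrite | github.com/skulllord/Eswatya-Ai-Health-Care-And-Appointment-System | backend/main.py | get_specialist_for_disease
-- ===== SOURCE A (Python) =====
-- def get_specialist_for_disease(disease_name: str) -> str:
--     """
--     Intelligently map disease to specialist using keyword detection.
--     Supports 677+ diseases with smart categorization.
--     """
--     disease_lower = disease_name.lower()
--
--     # Cardiology - Heart, blood vessels, circulation
--     cardio_keywords = [
--         'heart', 'cardiac', 'cardio', 'coronary', 'myocardial', 'angina',
--         'arrhythmia', 'brady', 'tachy', 'atrial', 'ventricular', 'valve',
--         'hypertension', 'blood pressure', 'circulation', 'vascular', 'varicose'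
--     ]
--     if any(kw in disease_lower for kw in cardio_keywords):
--         return "Cardiologist"
--
--     # Neurology - Brain, nerves, nervous system
--     neuro_keywords = [
--         'neuro', 'brain', 'nerve', 'paralysis', 'stroke', 'seizure', 'epilepsy',
--         'parkinson', 'alzheimer', 'dementia', 'migraine', 'headache', 'sclerosis',
--         'neuropathy', 'cerebral', 'spinal', 'meningitis', 'encephalitis'
--     ]
--     if any(kw in disease_lower for kw in neuro_keywords):
--         return "Neurologist"
--
--     # Pulmonology - Lungs, respiratory system
--     pulmo_keywords = [
--         'lung', 'pulmonary', 'respiratory', 'pneumonia', 'asthma', 'bronch',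
--         'copd', 'tuberculosis', 'tb', 'breathing', 'wheez', 'emphysema',
--         'pleural', 'thoracic'
--     ]
--     if any(kw in disease_lower for kw in pulmo_keywords):
--         return "Pulmonologist"
--
--     # Dermatology - Skin, hair, nails
--     derma_keywords = [
--         'skin', 'derma', 'rash', 'acne', 'psoriasis', 'eczema', 'fungal',
--         'impetigo', 'wart', 'mole', 'melanoma', 'dermatitis', 'hives',
--         'urticaria', 'vitiligo', 'alopecia', 'nail', 'hair'
--     ]
--     if any(kw in disease_lower for kw in derma_keywords):
--         return "Dermatologist"
--
--     # Orthopedics - Bones, joints, muscles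
--     ortho_keywords = [
--         'bone', 'joint', 'arthritis', 'fracture', 'osteo', 'spondyl',
--         'spine', 'vertebra', 'disc', 'ligament', 'tendon', 'cartilage',
--         'musculoskeletal', 'rheumat', 'back pain', 'neck pain'
--     ]
--     if any(kw in disease_lower for kw in ortho_keywords):
--         return "Orthopedist"
--
--     # Pediatrics - Children's diseases
--     pedia_keywords = [
--         'child', 'infant', 'pediatric', 'chickenpox', 'measles', 'mumps',
--         'whooping cough', 'croup', 'neonatal', 'congenital'
--     ]
--     if any(kw in disease_lower for kw in pedia_keywords):
--         return "Pediatrician"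
--
--     # Gynecology - Women's reproductive health
--     gynec_keywords = [
--         'gynec', 'uterus', 'ovary', 'cervix', 'menstrual', 'pregnancy',
--         'pcos', 'endometriosis', 'menopause', 'vaginal', 'breast',
--         'obstetric', 'maternal'
--     ]
--     if any(kw in disease_lower for kw in gynec_keywords):
--         return "Gynecologist"
--
--     # Default to General Physician for everything else
--     return "General Physician"
-- ===== SOURCE B (Python) =====
-- _RULES = [
--     ("Cardiologist", [
--         'heart', 'cardiac', 'cardio', 'coronary', 'myocardial', 'angina',
--         'arrhythmia', 'brady', 'tachy', 'atrial', 'ventricular', 'valve',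
--         'hypertension', 'blood pressure', 'circulation', 'vascular', 'varicose'
--     ]),
--     ("Neurologist", [
--         'neuro', 'brain', 'nerve', 'paralysis', 'stroke', 'seizure', 'epilepsy',
--         'parkinson', 'alzheimer', 'dementia', 'migraine', 'headache', 'sclerosis',
--         'neuropathy', 'cerebral', 'spinal', 'meningitis', 'encephalitis'
--     ]),
--     ("Pulmonologist", [
--         'lung', 'pulmonary', 'respiratory', 'pneumonia', 'asthma', 'bronch',
--         'copd', 'tuberculosis', 'tb', 'breathing', 'wheez', 'emphysema',
--         'pleural', 'thoracic'
--     ]),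
--     ("Dermatologist", [
--         'skin', 'derma', 'rash', 'acne', 'psoriasis', 'eczema', 'fungal',
--         'impetigo', 'wart', 'mole', 'melanoma', 'dermatitis', 'hives',
--         'urticaria', 'vitiligo', 'alopecia', 'nail', 'hair'
--     ]),
--     ("Orthopedist", [
--         'bone', 'joint', 'arthritis', 'fracture', 'osteo', 'spondyl',
--         'spine', 'vertebra', 'disc', 'ligament', 'tendon', 'cartilage',
--         'musculoskeletal', 'rheumat', 'back pain', 'neck pain'
--     ]),
--     ("Pediatrician", [
--         'child', 'infant', 'pediatric', 'chickenpox', 'measles', 'mumps',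
--         'whooping cough', 'croup', 'neonatal', 'congenital'
--     ]),
--     ("Gynecologist", [
--         'gynec', 'uterus', 'ovary', 'cervix', 'menstrual', 'pregnancy',
--         'pcos', 'endometriosis', 'menopause', 'vaginal', 'breast',
--         'obstetric', 'maternal'
--     ]),
-- ]
--
-- # Flat keyword index: every keyword tagged with its category's priority rank.
-- KEYWORD_INDEX = [(pri, spec, kw)
--                  for pri, (spec, kws) in enumerate(_RULES)
--                  for kw in kws]
--
--
-- def get_specialist_for_disease(disease_name: str) -> str:
--     disease_lower = disease_name.lower()
--     best = None
--     for pri, spec, kw in KEYWORD_INDEX: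
--         if kw in disease_lower and (best is None or pri < best[0]):
--             best = (pri, spec)
--     return best[1] if best is not None else "General Physician"
-- ===== Notes on version B (the rewrite author's own statement) =====
-- stated objective: alternative
-- what changed: Replaces seven sequential any()-blocks with early returns by one flat (priority, specialist, keyword) index scanned in a single full pass keeping the matching keyword of minimal category priority in an accumulator.
import Mathlib
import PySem

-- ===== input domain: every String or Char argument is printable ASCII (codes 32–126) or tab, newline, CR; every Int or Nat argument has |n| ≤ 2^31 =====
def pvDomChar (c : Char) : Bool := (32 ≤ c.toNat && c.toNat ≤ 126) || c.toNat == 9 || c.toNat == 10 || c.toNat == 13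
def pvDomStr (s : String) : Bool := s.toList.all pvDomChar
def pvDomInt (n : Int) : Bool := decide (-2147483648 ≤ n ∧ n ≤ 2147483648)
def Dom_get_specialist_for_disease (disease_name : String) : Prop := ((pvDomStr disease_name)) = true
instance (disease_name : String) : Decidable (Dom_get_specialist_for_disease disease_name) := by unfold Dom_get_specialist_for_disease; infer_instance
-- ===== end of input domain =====

-- B replaces A's seven early-return category blocks by one flat keyword index scanned
-- in a single full pass with a min-priority accumulator (objective: alternative).

-- ===== PORT A =====
def get_specialist_for_disease (disease_name : String) : String :=
  let disease_lower := PySem.Str.lower disease_name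
  let cardio_keywords : List String := [
    "heart", "cardiac", "cardio", "coronary", "myocardial", "angina",
    "arrhythmia", "brady", "tachy", "atrial", "ventricular", "valve",
    "hypertension", "blood pressure", "circulation", "vascular", "varicose"]
  if cardio_keywords.any (fun kw => PySem.Str.isIn kw disease_lower) then "Cardiologist"
  else
  let neuro_keywords : List String := [
    "neuro", "brain", "nerve", "paralysis", "stroke", "seizure", "epilepsy",
    "parkinson", "alzheimer", "dementia", "migraine", "headache", "sclerosis",
    "neuropathy", "cerebral", "spinal", "meningitis", "encephalitis"]
  if neuro_keywords.any (fun kw => PySem.Str.isIn kw disease_lower) then "Neurologist"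
  else
  let pulmo_keywords : List String := [
    "lung", "pulmonary", "respiratory", "pneumonia", "asthma", "bronch",
    "copd", "tuberculosis", "tb", "breathing", "wheez", "emphysema",
    "pleural", "thoracic"]
  if pulmo_keywords.any (fun kw => PySem.Str.isIn kw disease_lower) then "Pulmonologist"
  else
  let derma_keywords : List String := [
    "skin", "derma", "rash", "acne", "psoriasis", "eczema", "fungal",
    "impetigo", "wart", "mole", "melanoma", "dermatitis", "hives",
    "urticaria", "vitiligo", "alopecia", "nail", "hair"]
  if derma_keywords.any (fun kw => PySem.Str.isIn kw disease_lower) then "Dermatologist"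
  else
  let ortho_keywords : List String := [
    "bone", "joint", "arthritis", "fracture", "osteo", "spondyl",
    "spine", "vertebra", "disc", "ligament", "tendon", "cartilage",
    "musculoskeletal", "rheumat", "back pain", "neck pain"]
  if ortho_keywords.any (fun kw => PySem.Str.isIn kw disease_lower) then "Orthopedist"
  else
  let pedia_keywords : List String := [
    "child", "infant", "pediatric", "chickenpox", "measles", "mumps",
    "whooping cough", "croup", "neonatal", "congenital"]
  if pedia_keywords.any (fun kw => PySem.Str.isIn kw disease_lower) then "Pediatrician"
  else
  let gynec_keywords : List String := [
    "gynec", "uterus", "ovary", "cervix", "menstrual", "pregnancy",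
    "pcos", "endometriosis", "menopause", "vaginal", "breast",
    "obstetric", "maternal"]
  if gynec_keywords.any (fun kw => PySem.Str.isIn kw disease_lower) then "Gynecologist"
  else "General Physician"

-- ===== PORT B =====
def pvRULES : List (String × List String) := [
  ("Cardiologist", [
    "heart", "cardiac", "cardio", "coronary", "myocardial", "angina",
    "arrhythmia", "brady", "tachy", "atrial", "ventricular", "valve",
    "hypertension", "blood pressure", "circulation", "vascular", "varicose"]),
  ("Neurologist", [
    "neuro", "brain", "nerve", "paralysis", "stroke", "seizure", "epilepsy",
    "parkinson", "alzheimer", "dementia", "migraine", "headache", "sclerosis",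
    "neuropathy", "cerebral", "spinal", "meningitis", "encephalitis"]),
  ("Pulmonologist", [
    "lung", "pulmonary", "respiratory", "pneumonia", "asthma", "bronch",
    "copd", "tuberculosis", "tb", "breathing", "wheez", "emphysema",
    "pleural", "thoracic"]),
  ("Dermatologist", [
    "skin", "derma", "rash", "acne", "psoriasis", "eczema", "fungal",
    "impetigo", "wart", "mole", "melanoma", "dermatitis", "hives",
    "urticaria", "vitiligo", "alopecia", "nail", "hair"]),
  ("Orthopedist", [
    "bone", "joint", "arthritis", "fracture", "osteo", "spondyl",
    "spine", "vertebra", "disc", "ligament", "tendon", "cartilage",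
    "musculoskeletal", "rheumat", "back pain", "neck pain"]),
  ("Pediatrician", [
    "child", "infant", "pediatric", "chickenpox", "measles", "mumps",
    "whooping cough", "croup", "neonatal", "congenital"]),
  ("Gynecologist", [
    "gynec", "uterus", "ovary", "cervix", "menstrual", "pregnancy",
    "pcos", "endometriosis", "menopause", "vaginal", "breast",
    "obstetric", "maternal"])]

-- flat keyword index: (priority, specialist, keyword), the Source B comprehension
def pvKEYWORD_INDEX : List (Int × String × String) :=
  (PySem.List.enumerate pvRULES).flatMap
    (fun pe => pe.2.2.map (fun kw => (pe.1, pe.2.1, kw)))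

-- the body of Source B's for-loop: keep the matching keyword of least priority
def pvStep (dl : String) (acc : Option (Int × String)) (e : Int × String × String) :
    Option (Int × String) :=
  if PySem.Str.isIn e.2.2 dl &&
      (match acc with | none => true | some (p, _) => decide (e.1 < p)) then
    some (e.1, e.2.1)
  else acc

def get_specialist_for_disease_alt (disease_name : String) : String :=
  let disease_lower := PySem.Str.lower disease_name
  let best := pvKEYWORD_INDEX.foldl (pvStep disease_lower) none
  match best with
  | some (_, spec) => spec
  | none => "General Physician"

-- ===== PRECONDITION & SPEC =====
def Spec_get_specialist_for_disease (disease_name : String) (out : String) : Prop := out = get_specialist_for_disease_alt disease_name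
instance (disease_name : String) (out : String) : Decidable (Spec_get_specialist_for_disease disease_name out) := by unfold Spec_get_specialist_for_disease; infer_instance

-- ===== CLAIM (what is proved, stated in full; the proofs are below) =====
def Claim_equal_get_specialist_for_disease : Prop := ∀ (disease_name : String), Dom_get_specialist_for_disease disease_name → Spec_get_specialist_for_disease disease_name (get_specialist_for_disease disease_name)

-- ===== LEMMAS AND PROOFS =====

-- once the accumulator holds a priority no worse than any remaining entry, it is final
theorem pvStep_stable (dl : String) (p : Int) (s : String)
    (l : List (Int × String × String)) (h : ∀ e ∈ l, p ≤ e.1) :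
    l.foldl (pvStep dl) (some (p, s)) = some (p, s) := by
  induction l with
  | nil => rfl
  | cons e l ih =>
    have hp : ¬ e.1 < p := not_lt.mpr (h e (List.mem_cons_self ..))
    have : pvStep dl (some (p, s)) e = some (p, s) := by
      simp [pvStep, hp]
    rw [List.foldl_cons, this]
    exact ih (fun e he => h e (List.mem_cons_of_mem _ he))

-- scanning one keyword group followed by lower-priority entries
theorem pvStep_none (dl kw spec : String) (pri : Int) :
    pvStep dl none (pri, spec, kw) =
      if PySem.Str.isIn kw dl then some (pri, spec) else none := by
  simp [pvStep]

theorem pvScan_group (dl : String) (pri : Int) (spec : String) (kws : List String)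
    (rest : List (Int × String × String)) (h : ∀ e ∈ rest, pri ≤ e.1) :
    ((kws.map (fun kw => (pri, spec, kw))) ++ rest).foldl (pvStep dl) none =
      if kws.any (fun kw => PySem.Str.isIn kw dl) then some (pri, spec)
      else rest.foldl (pvStep dl) none := by
  induction kws with
  | nil => simp
  | cons kw kws ih =>
    simp only [List.map_cons, List.cons_append, List.foldl_cons, pvStep_none, List.any_cons]
    by_cases hk : PySem.Str.isIn kw dl
    · simp only [hk, Bool.true_or, if_true]
      apply pvStep_stable
      intro e he
      rcases List.mem_append.mp he with hm | hm
      · rcases List.mem_map.mp hm with ⟨_, _, rfl⟩; exact le_refl _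
      · exact h e hm
    · simp only [Bool.eq_false_iff.mpr hk, Bool.false_or]
      exact ih

-- the flat index is the concatenation of the per-category keyword groups
theorem pvIndex_eq : pvKEYWORD_INDEX =
      ([ "heart", "cardiac", "cardio", "coronary", "myocardial", "angina",
         "arrhythmia", "brady", "tachy", "atrial", "ventricular", "valve",
         "hypertension", "blood pressure", "circulation", "vascular", "varicose"].map
           (fun kw => ((0:Int), "Cardiologist", kw))) ++
      (([ "neuro", "brain", "nerve", "paralysis", "stroke", "seizure", "epilepsy",
         "parkinson", "alzheimer", "dementia", "migraine", "headache", "sclerosis",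
         "neuropathy", "cerebral", "spinal", "meningitis", "encephalitis"].map
           (fun kw => ((1:Int), "Neurologist", kw))) ++
      (([ "lung", "pulmonary", "respiratory", "pneumonia", "asthma", "bronch",
         "copd", "tuberculosis", "tb", "breathing", "wheez", "emphysema",
         "pleural", "thoracic"].map
           (fun kw => ((2:Int), "Pulmonologist", kw))) ++
      (([ "skin", "derma", "rash", "acne", "psoriasis", "eczema", "fungal",
         "impetigo", "wart", "mole", "melanoma", "dermatitis", "hives",
         "urticaria", "vitiligo", "alopecia", "nail", "hair"].map
           (fun kw => ((3:Int), "Dermatologist", kw))) ++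
      (([ "bone", "joint", "arthritis", "fracture", "osteo", "spondyl",
         "spine", "vertebra", "disc", "ligament", "tendon", "cartilage",
         "musculoskeletal", "rheumat", "back pain", "neck pain"].map
           (fun kw => ((4:Int), "Orthopedist", kw))) ++
      (([ "child", "infant", "pediatric", "chickenpox", "measles", "mumps",
         "whooping cough", "croup", "neonatal", "congenital"].map
           (fun kw => ((5:Int), "Pediatrician", kw))) ++
      (([ "gynec", "uterus", "ovary", "cervix", "menstrual", "pregnancy",
         "pcos", "endometriosis", "menopause", "vaginal", "breast",
         "obstetric", "maternal"].map
           (fun kw => ((6:Int), "Gynecologist", kw))) ++ ([] : List (Int × String × String))))))))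
      := by decide

-- the whole fold, evaluated group by group
theorem pvFold_eq (dl : String) : pvKEYWORD_INDEX.foldl (pvStep dl) none =
    (if (["heart", "cardiac", "cardio", "coronary", "myocardial", "angina",
          "arrhythmia", "brady", "tachy", "atrial", "ventricular", "valve",
          "hypertension", "blood pressure", "circulation", "vascular", "varicose"].any
            (fun kw => PySem.Str.isIn kw dl)) then some ((0:Int), "Cardiologist")
     else if (["neuro", "brain", "nerve", "paralysis", "stroke", "seizure", "epilepsy",
          "parkinson", "alzheimer", "dementia", "migraine", "headache", "sclerosis",
          "neuropathy", "cerebral", "spinal", "meningitis", "encephalitis"].any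
            (fun kw => PySem.Str.isIn kw dl)) then some ((1:Int), "Neurologist")
     else if (["lung", "pulmonary", "respiratory", "pneumonia", "asthma", "bronch",
          "copd", "tuberculosis", "tb", "breathing", "wheez", "emphysema",
          "pleural", "thoracic"].any
            (fun kw => PySem.Str.isIn kw dl)) then some ((2:Int), "Pulmonologist")
     else if (["skin", "derma", "rash", "acne", "psoriasis", "eczema", "fungal",
          "impetigo", "wart", "mole", "melanoma", "dermatitis", "hives",
          "urticaria", "vitiligo", "alopecia", "nail", "hair"].any
            (fun kw => PySem.Str.isIn kw dl)) then some ((3:Int), "Dermatologist")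
     else if (["bone", "joint", "arthritis", "fracture", "osteo", "spondyl",
          "spine", "vertebra", "disc", "ligament", "tendon", "cartilage",
          "musculoskeletal", "rheumat", "back pain", "neck pain"].any
            (fun kw => PySem.Str.isIn kw dl)) then some ((4:Int), "Orthopedist")
     else if (["child", "infant", "pediatric", "chickenpox", "measles", "mumps",
          "whooping cough", "croup", "neonatal", "congenital"].any
            (fun kw => PySem.Str.isIn kw dl)) then some ((5:Int), "Pediatrician")
     else if (["gynec", "uterus", "ovary", "cervix", "menstrual", "pregnancy",
          "pcos", "endometriosis", "menopause", "vaginal", "breast",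
          "obstetric", "maternal"].any
            (fun kw => PySem.Str.isIn kw dl)) then some ((6:Int), "Gynecologist")
     else none) := by
  rw [pvIndex_eq]
  rw [pvScan_group dl 0 _ _ _ (by decide)]
  rw [pvScan_group dl 1 _ _ _ (by decide)]
  rw [pvScan_group dl 2 _ _ _ (by decide)]
  rw [pvScan_group dl 3 _ _ _ (by decide)]
  rw [pvScan_group dl 4 _ _ _ (by decide)]
  rw [pvScan_group dl 5 _ _ _ (by decide)]
  rw [pvScan_group dl 6 _ _ _ (by decide)]
  rfl

-- ===== VERDICT (by name: the statement is the Claim_ definition above) =====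
theorem get_specialist_for_disease_spec : Claim_equal_get_specialist_for_disease := by
  intro s _
  unfold Spec_get_specialist_for_disease get_specialist_for_disease get_specialist_for_disease_alt
  simp only [pvFold_eq]
  split_ifs <;> rfl
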